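-- pv_equiv track=rewrite | github.com/981377660LMT/algorithm-study | 10_分治法/检查是否每个子数组都包含unique元素.py | solve
-- ===== SOURCE A (Python) =====
-- from collections import Counter
-- from typing import List
--
-- def solve(nums: List[int]) -> bool:
--     def check(left: int, right: int) -> bool:
--         """[left,right]这段是否存在unique元素"""
--         if left >= right:
--             return True
--
--         counter = Counter(nums[left : right + 1])
--         if min(counter.values()) > 1:
--             return False
--
--         splitIndex = left
--         for index in range(left, right + 1):
--             # 需要检查左边
--             if counter[nums[index]] == 1:
--                 if not check(splitIndex, index - 1):
--                     return False
--                 splitIndex = index + 1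
--
--         return check(splitIndex, right)
--
--     return check(0, len(nums) - 1)
-- ===== SOURCE B (Python) =====
-- from typing import List
--
-- def solve(nums: List[int]) -> bool:
--     # The recursion in A succeeds exactly when every contiguous subarray of
--     # nums contains an element occurring exactly once in it ("non-boring").
--     # B checks that property directly: for each start i it extends the end j,
--     # maintaining counts and the number of values occurring exactly once.
--     n = len(nums)
--     for i in range(n):
--         count = {}
--         uniques = 0
--         for j in range(i, n):
--             v = nums[j]
--             c = count.get(v, 0) + 1
--             count[v] = c
--             if c == 1:
--                 uniques += 1
--             elif c == 2:
--                 uniques -= 1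
--             if uniques == 0:
--                 return False
--     return True
-- ===== Notes on version B (the rewrite author's own statement) =====
-- stated objective: simpler
-- what changed: A recursively splits each segment at its unique elements (Counter per segment, split-index loop, recursion); B uses no recursion at all: it checks the equivalent direct property that every contiguous subarray contains an element occurring exactly once, by two nested loops that extend the end index while incrementally maintaining counts and the number of currently-unique values.
import Mathlib
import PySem

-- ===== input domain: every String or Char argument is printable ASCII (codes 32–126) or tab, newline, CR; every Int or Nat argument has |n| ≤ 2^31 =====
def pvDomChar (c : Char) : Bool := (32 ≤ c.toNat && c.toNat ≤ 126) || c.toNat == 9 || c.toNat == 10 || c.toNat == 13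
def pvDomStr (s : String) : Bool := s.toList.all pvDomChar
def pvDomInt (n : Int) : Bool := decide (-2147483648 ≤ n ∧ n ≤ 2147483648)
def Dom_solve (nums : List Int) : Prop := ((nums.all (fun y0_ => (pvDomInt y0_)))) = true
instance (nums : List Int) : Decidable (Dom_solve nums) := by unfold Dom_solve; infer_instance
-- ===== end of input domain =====

-- B replaces A's recursive split-at-unique-elements procedure by a non-recursive check of the
-- equivalent property that every contiguous subarray contains an element occurring exactly once
-- in it, maintained incrementally over two nested index loops; objective: simpler.

-- ===== PORT A =====
-- body of A's for-loop over `index`; `rec` is the recursive `check` at the current depth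
def stepA (counter : PySem.Dict Int Int) (nums : List Int) (rec : Int → Int → Bool)
    (st : Option Int) (index : Int) : Option Int :=
  match st with
  | none => none
  | some splitIndex =>
    if counter.getD (PySem.List.pyGetD nums index 0) 0 == 1 then
      if !(rec splitIndex (index - 1)) then none
      else some (index + 1)
    else some splitIndex

-- fuel-guarded port of A's nested `check(left, right)`; fuel `len(nums)+1` always suffices
-- (every recursive call strictly shrinks the segment), so `solve` computes exactly A's recursion
def checkA (nums : List Int) : Nat → Int → Int → Bool
  | 0, _, _ => true
  | fuel+1, left, right =>
    if left ≥ right then true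
    else
      let seg := PySem.List.slice nums (some left) (some (right + 1))
      let counter := PySem.Dict.counter seg
      match PySem.List.min? counter.values (fun v => v) with
      | none => false
      | some m =>
        if m > 1 then false
        else
          match (PySem.List.pyRange left (right + 1) 1).foldl
              (stepA counter nums (checkA nums fuel)) (some left) with
          | none => false
          | some splitIndex => checkA nums fuel splitIndex right

def solve (nums : List Int) : Bool := checkA nums (nums.length + 1) 0 ((nums.length : Int) - 1)

-- ===== PORT B =====
-- body of B's inner `for j in range(i, n)` loop; state = (count dict, uniques), none = returned False
def stepInner (nums : List Int) (st : Option (PySem.Dict Int Int × Int)) (j : Int) :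
    Option (PySem.Dict Int Int × Int) :=
  match st with
  | none => none
  | some (count, uniques) =>
    let v := PySem.List.pyGetD nums j 0
    let c := count.getD v 0 + 1
    let count' := count.insert v c
    let uniques' := if c == 1 then uniques + 1 else if c == 2 then uniques - 1 else uniques
    if uniques' == 0 then none else some (count', uniques')

-- B's inner loop for one start index i: true unless some end index j triggered `return False`
def innerB (nums : List Int) (i : Int) : Bool :=
  ((PySem.List.pyRange i (nums.length : Int) 1).foldl (stepInner nums)
    (some (PySem.Dict.empty, 0))).isSome

def solve_alt (nums : List Int) : Bool :=
  (PySem.List.pyRange 0 (nums.length : Int) 1).all (fun i => innerB nums i)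

-- ===== PRECONDITION & SPEC =====
def Spec_solve (nums : List Int) (out : Bool) : Prop := out = solve_alt nums
instance (nums : List Int) (out : Bool) : Decidable (Spec_solve nums out) := by unfold Spec_solve; infer_instance

-- ===== CLAIM (what is proved, stated in full; the proofs are below) =====
def Claim_equal_solve : Prop := ∀ (nums : List Int), Dom_solve nums → Spec_solve nums (solve nums)

-- ===== LEMMAS AND PROOFS =====

-- `s` contains an element occurring exactly once in it
def hasU (s : List Int) : Prop := ∃ v ∈ s, s.count v = 1

-- "non-boring": every contiguous subarray of nums within [l,r] has a unique element
def NB (nums : List Int) (l r : Int) : Prop :=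
  ∀ i j : Int, l ≤ i → i ≤ j → j ≤ r →
    hasU (PySem.List.slice nums (some i) (some (j+1)))

-- number of distinct values occurring exactly once in s
def UF (s : List Int) : Nat := (s.toFinset.filter (fun v => s.count v = 1)).card

-- positions (relative to the segment) of the unique elements
def uPos (seg : List Int) : List Int :=
  ((PySem.List.enumerate seg 0).filter (fun iv => seg.count iv.2 == 1)).map (·.1)

-- the maximal index intervals between consecutive split points
def gapsP (r : Int) : Int → List Int → List (Int × Int)
  | prev, [] => [(prev, r)]
  | prev, p :: ps => (prev, p - 1) :: gapsP r (p + 1) ps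

theorem hasU_singleton (x : Int) : hasU [x] := ⟨x, by simp, by simp⟩

theorem UF_pos_iff (s : List Int) : 0 < UF s ↔ hasU s := by
  unfold UF hasU
  rw [Finset.card_pos]
  constructor
  · rintro ⟨v, hv⟩
    rw [Finset.mem_filter, List.mem_toFinset] at hv
    exact ⟨v, hv.1, hv.2⟩
  · rintro ⟨v, hv, hc⟩
    exact ⟨v, Finset.mem_filter.mpr ⟨List.mem_toFinset.mpr hv, hc⟩⟩

theorem UF_nil : UF [] = 0 := by unfold UF; simp

theorem card_filter_insert_erase (T : Finset Int) (v : Int) (p : Int → Prop) [DecidablePred p] :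
    ((insert v (T.erase v)).filter p).card
      = ((T.erase v).filter p).card + (if p v then 1 else 0) := by
  rw [Finset.filter_insert]
  by_cases hpv : p v
  · rw [if_pos hpv, if_pos hpv,
      Finset.card_insert_of_notMem (fun hmem => (Finset.notMem_erase v T) (Finset.mem_filter.mp hmem).1)]
  · rw [if_neg hpv, if_neg hpv, Nat.add_zero]

theorem UF_append (s : List Int) (v : Int) :
    (UF (s ++ [v]) : Int) =
      if s.count v = 0 then (UF s : Int) + 1
      else if s.count v = 1 then (UF s : Int) - 1
      else (UF s : Int) := by
  have hCount : ∀ w : Int, (s ++ [v]).count w = s.count w + if w = v then 1 else 0 := by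
    intro w
    rw [List.count_append]
    by_cases h : w = v
    · simp [h]
    · rw [List.count_eq_zero.mpr (by simp [h] : w ∉ [v]), if_neg h]
  have hT' : (s ++ [v]).toFinset = insert v s.toFinset := by
    ext w; simp [or_comm]
  have hins1 : insert v s.toFinset = insert v (s.toFinset.erase v) := by
    by_cases hv : v ∈ s.toFinset
    · rw [Finset.insert_erase hv]
      exact Finset.insert_eq_self.mpr hv
    · rw [Finset.erase_eq_of_notMem hv]
  set C := ((s.toFinset.erase v).filter (fun w => s.count w = 1)).card with hC
  have hfc : ((s.toFinset.erase v).filter (fun w => (s ++ [v]).count w = 1))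
      = ((s.toFinset.erase v).filter (fun w => s.count w = 1)) := by
    apply Finset.filter_congr
    intro w hw
    have hwv : w ≠ v := (Finset.mem_erase.mp hw).1
    rw [hCount w, if_neg hwv, Nat.add_zero]
  have hvc : (s ++ [v]).count v = s.count v + 1 := by rw [hCount v, if_pos rfl]
  have hA : UF (s ++ [v]) = C + (if s.count v = 0 then 1 else 0) := by
    unfold UF
    rw [hT', hins1, card_filter_insert_erase, hfc]
    congr 1
    by_cases h0 : s.count v = 0
    · rw [if_pos (by omega : (s ++ [v]).count v = 1), if_pos h0]
    · rw [if_neg (by omega : ¬ (s ++ [v]).count v = 1), if_neg h0]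
  have hB : UF s = C + (if s.count v = 1 then 1 else 0) := by
    unfold UF
    by_cases hv : v ∈ s
    · rw [show s.toFinset = insert v (s.toFinset.erase v) from
        (Finset.insert_erase (List.mem_toFinset.mpr hv)).symm, card_filter_insert_erase, hC]
    · have h0 : s.count v = 0 := List.count_eq_zero.mpr hv
      rw [if_neg (by omega), Nat.add_zero, hC,
        Finset.erase_eq_of_notMem (fun hvT => hv (List.mem_toFinset.mp hvT))]
  rw [hA, hB]
  by_cases h0 : s.count v = 0
  · simp [h0] <;> omega
  · by_cases h1' : s.count v = 1
    · simp [h0, h1'] <;> omega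
    · simp [h0, h1'] <;> omega

theorem count_mono_window (xs : List Int) (a b c d : Nat) (v : Int) (h1 : c ≤ a)
    (h2 : a + b ≤ c + d) :
    ((xs.drop a).take b).count v ≤ ((xs.drop c).take d).count v := by
  apply List.Sublist.count_le
  have e1 : ((xs.drop c).take d).drop (a - c) = (xs.drop a).take (d - (a - c)) := by
    rw [List.drop_take, List.drop_drop]
    congr 2
    omega
  have hb : b ≤ d - (a - c) := by omega
  have e2 : (xs.drop a).take b = (((xs.drop c).take d).drop (a - c)).take b := by
    rw [e1, List.take_take, Nat.min_eq_left hb]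
  rw [e2]
  exact (List.take_sublist _ _).trans (List.drop_sublist _ _)

theorem seg_facts (nums : List Int) (l r : Int) (h0 : 0 ≤ l) (hlr : l ≤ r + 1)
    (hr : r < (nums.length : Int)) :
    PySem.List.slice nums (some l) (some (r+1)) = (nums.drop l.toNat).take (r + 1 - l).toNat
    ∧ (PySem.List.slice nums (some l) (some (r+1))).length = (r + 1 - l).toNat := by
  have h1 : PySem.List.slice nums (some l) (some (r+1)) = (nums.drop l.toNat).take ((r+1).toNat - l.toNat) :=
    PySem.List.slice_toNat nums h0 (by omega)
  have h2 : ((r+1).toNat - l.toNat) = (r + 1 - l).toNat := by omega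
  refine ⟨by rw [h1, h2], ?_⟩
  rw [h1, h2]
  simp [List.length_take, List.length_drop]
  omega

theorem seg_getElem (nums : List Int) (l r : Int) (h0 : 0 ≤ l)
    (hr : r < (nums.length : Int)) (k : Nat) (hk : k < (r + 1 - l).toNat) :
    ∀ (hx : k < (PySem.List.slice nums (some l) (some (r+1))).length)
      (hy : l.toNat + k < nums.length),
      (PySem.List.slice nums (some l) (some (r+1)))[k] = nums[l.toNat + k] := by
  intro hx hy
  obtain ⟨hseg, hlen⟩ := seg_facts nums l r h0 (by omega) hr
  simp only [hseg] at hx ⊢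
  rw [List.getElem_take, List.getElem_drop]

theorem slice_snoc (nums : List Int) (i a : Int) (h0 : 0 ≤ i) (hia : i ≤ a)
    (han : a < (nums.length : Int)) :
    PySem.List.slice nums (some i) (some (a+1))
      = PySem.List.slice nums (some i) (some a) ++ [PySem.List.pyGetD nums a 0] := by
  rw [PySem.List.slice_toNat nums h0 (by omega : (0:Int) ≤ a + 1),
      PySem.List.slice_toNat nums (b := a) h0 (by omega),
      PySem.List.pyGetD_eq_getElem nums 0 (by omega) han]
  have h1 : (a+1).toNat - i.toNat = (a.toNat - i.toNat) + 1 := by omega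
  rw [h1, List.take_add_one]
  congr 1
  have hlen : a.toNat - i.toNat < (nums.drop i.toNat).length := by
    rw [List.length_drop]; omega
  rw [List.getElem?_drop]
  have h2 : i.toNat + (a.toNat - i.toNat) = a.toNat := by omega
  rw [h2, List.getElem?_eq_getElem (by omega)]
  rfl

theorem slice_one (nums : List Int) (i : Int) (h0 : 0 ≤ i) (hn : i < (nums.length : Int)) :
    PySem.List.slice nums (some i) (some (i+1)) = [PySem.List.pyGetD nums i 0] := by
  rw [slice_snoc nums i i h0 le_rfl hn, PySem.List.slice_toNat nums h0 h0]
  simp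

theorem count_slice_le (nums : List Int) (l r i j v : Int) (h0 : 0 ≤ l) (hli : l ≤ i)
    (hij : i ≤ j + 1) (hjr : j ≤ r) :
    (PySem.List.slice nums (some i) (some (j+1))).count v
      ≤ (PySem.List.slice nums (some l) (some (r+1))).count v := by
  rw [PySem.List.slice_toNat nums (by omega) (by omega),
      PySem.List.slice_toNat nums h0 (by omega)]
  exact count_mono_window nums i.toNat ((j+1).toNat - i.toNat) l.toNat ((r+1).toNat - l.toNat) v
    (by omega) (by omega)

theorem mem_slice_of_between (nums : List Int) (i j p : Int) (h0 : 0 ≤ i) (hip : i ≤ p)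
    (hpj : p ≤ j) (hj : j < (nums.length : Int)) :
    PySem.List.pyGetD nums p 0 ∈ PySem.List.slice nums (some i) (some (j+1)) := by
  obtain ⟨hseg, hlen⟩ := seg_facts nums i j h0 (by omega) hj
  have hk : (p - i).toNat < (j + 1 - i).toNat := by omega
  have hx : (p - i).toNat < (PySem.List.slice nums (some i) (some (j+1))).length := by omega
  have hy : i.toNat + (p - i).toNat < nums.length := by omega
  have hge := seg_getElem nums i j h0 hj (p - i).toNat hk hx hy
  apply List.mem_iff_getElem?.mpr
  refine ⟨(p - i).toNat, ?_⟩
  rw [List.getElem?_eq_getElem hx, hge,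
    PySem.List.pyGetD_eq_getElem nums 0 (by omega) (by omega),
    ← List.getElem?_eq_getElem hy]
  have hidx : i.toNat + (p - i).toNat = p.toNat := by omega
  rw [hidx]
  exact List.getElem?_eq_getElem (by omega)

-- ---- A-side: the fold over the split points, and the min-of-Counter test ----

theorem values_counter_eq (seg : List Int) :
    (PySem.Dict.counter seg).values = (PySem.Set.ofList seg).map (fun k => (seg.count k : Int)) := by
  rw [PySem.Dict.values_eq_map_keys _ (PySem.Dict.nodup_keys_counter seg) 0,
    PySem.Dict.keys_counter]
  exact List.map_congr_left (fun k _ => PySem.Dict.getD_counter seg k)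

theorem min_values_some (seg : List Int) (hne : seg ≠ []) :
    ∃ m, PySem.List.min? (PySem.Dict.counter seg).values (fun v => v) = some m := by
  rcases hx : PySem.List.min? (PySem.Dict.counter seg).values (fun v => v) with _ | m
  · exfalso
    rw [PySem.List.min?_eq_none_iff] at hx
    rw [values_counter_eq] at hx
    obtain ⟨x, hxs⟩ := List.exists_mem_of_ne_nil seg hne
    have : x ∈ PySem.Set.ofList seg := (PySem.Set.mem_ofList _ _).mpr hxs
    simp [List.map_eq_nil_iff] at hx
    rw [hx] at this; simp at this
  · exact ⟨m, rfl⟩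

theorem min_values_gt (seg : List Int) (m : Int)
    (hm : PySem.List.min? (PySem.Dict.counter seg).values (fun v => v) = some m)
    (h1 : 1 < m) : ∀ v ∈ seg, seg.count v ≠ 1 := by
  intro v hv hc
  have hmem : ((seg.count v : Int)) ∈ (PySem.Dict.counter seg).values := by
    rw [values_counter_eq]
    exact List.mem_map_of_mem ((PySem.Set.mem_ofList _ _).mpr hv)
  have := PySem.List.min?_isMin hm _ hmem
  rw [hc] at this; simp at this; omega

theorem min_values_le (seg : List Int) (m : Int)
    (hm : PySem.List.min? (PySem.Dict.counter seg).values (fun v => v) = some m)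
    (h1 : ¬ 1 < m) : ∃ v ∈ seg, seg.count v = 1 := by
  have hmem := PySem.List.min?_mem hm
  rw [values_counter_eq] at hmem
  obtain ⟨v, hv, hveq⟩ := List.mem_map.mp hmem
  refine ⟨v, (PySem.Set.mem_ofList _ _).mp hv, ?_⟩
  have hc1 : 1 ≤ seg.count v := List.one_le_count_iff.mpr ((PySem.Set.mem_ofList _ _).mp hv)
  omega

theorem uPos_mem_bounds (seg : List Int) (j : Int) (hj : j ∈ uPos seg) :
    0 ≤ j ∧ j < (seg.length : Int) := by
  unfold uPos at hj
  obtain ⟨iv, hiv, hj'⟩ := List.mem_map.mp hj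
  have hmem := List.mem_of_mem_filter hiv
  obtain ⟨k, hk, hp⟩ := (PySem.List.mem_enumerate_iff _ _ _).mp hmem
  subst hj'
  rw [hp]
  simp
  omega

theorem uPos_pairwise (seg : List Int) : (uPos seg).Pairwise (· < ·) := by
  unfold uPos
  exact ((PySem.List.pairwise_lt_enumerate seg 0).filter _).map _ (fun _ _ h => h)

theorem uPos_ne_nil (seg : List Int) (v : Int) (hv : v ∈ seg) (hc : seg.count v = 1) :
    uPos seg ≠ [] := by
  obtain ⟨k, hk, hkv⟩ := List.getElem_of_mem hv
  apply List.ne_nil_of_mem (a := ((k : Int)))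
  unfold uPos
  apply List.mem_map_of_mem (f := fun iv : Int × Int => iv.1) (a := ((k : Int), v))
  rw [List.mem_filter]
  constructor
  · exact (PySem.List.mem_enumerate_iff _ _ _).mpr ⟨k, hk, by rw [hkv]; simp⟩
  · simp [hc]

theorem foldl_stepA_none (c : PySem.Dict Int Int) (nums : List Int) (rec : Int → Int → Bool)
    (xs : List Int) : xs.foldl (stepA c nums rec) none = none := by
  induction xs with
  | nil => rfl
  | cons x t ih => exact ih

theorem foldl_filter_of_id {α β : Type} (f : β → α → β) (p : α → Bool)
    (h : ∀ st x, p x = false → f st x = st) :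
    ∀ (xs : List α) (init : β), xs.foldl f init = (xs.filter p).foldl f init := by
  intro xs
  induction xs with
  | nil => intro init; rfl
  | cons x t ih =>
    intro init
    by_cases hp : p x = true
    · rw [List.foldl_cons, List.filter_cons_of_pos hp, List.foldl_cons, ih]
    · rw [List.foldl_cons, List.filter_cons_of_neg (by simpa using hp),
        h init x (by simpa using hp), ih]

theorem afilter_eq (nums : List Int) (l r : Int) (h0 : 0 ≤ l) (hlr : l < r)
    (hr : r < (nums.length : Int)) :
    (PySem.List.pyRange l (r+1) 1).filter
        (fun idx => (PySem.Dict.counter (PySem.List.slice nums (some l) (some (r+1)))).getD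
          (PySem.List.pyGetD nums idx 0) 0 == 1)
      = (uPos (PySem.List.slice nums (some l) (some (r+1)))).map (fun j => l + j) := by
  set seg := PySem.List.slice nums (some l) (some (r+1)) with hsegdef
  obtain ⟨hseg, hlen⟩ := seg_facts nums l r h0 (by omega) hr
  set s := (r + 1 - l).toNat with hs
  have hls : (l.toNat + s : Int) = r + 1 := by omega
  have hbound : l.toNat + s ≤ nums.length := by omega
  rw [PySem.List.pyRange_one, List.filter_map]
  unfold uPos
  rw [PySem.List.enumerate_eq_map_pyRange seg 0]
  have hlenint : PySem.List.len seg = (s : Int) := by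
    simp only [PySem.List.len_eq]; rw [hlen]
  rw [hlenint, PySem.List.pyRange_zero_natCast, List.filter_map, List.filter_map, List.map_map]
  have hr1l : (r + 1 - l).toNat = s := rfl
  rw [hr1l]
  have hpt : ∀ k ∈ List.range s,
      ((fun idx => (PySem.Dict.counter seg).getD (PySem.List.pyGetD nums idx 0) 0 == 1) ∘ fun (k : Nat) => l + (k : Int)) k
        = (((fun iv => seg.count iv.2 == 1) ∘ fun (j : Int) => (j, PySem.List.pyGetD seg j 0)) ∘ fun (k : Nat) => (k : Int)) k := by
    intro k hk
    have hks : k < s := List.mem_range.mp hk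
    have hlen' : seg.length = s := hlen
    have hky : l.toNat + k < nums.length := by omega
    have hidx : (l + (k : Int)).toNat = l.toNat + k := by omega
    have e1 : PySem.List.pyGetD nums (l + (k : Int)) 0 = nums[l.toNat + k] := by
      rw [PySem.List.pyGetD_eq_getElem nums 0 (by omega) (by push_cast; omega)]
      simp only [hidx]
    have e2 : PySem.List.pyGetD seg (k : Int) 0 = seg[k]'(by omega) := by
      rw [PySem.List.pyGetD_eq_getElem seg 0 (by omega) (by rw [hlen']; push_cast; omega)]
      simp
    have e3 : seg[k]'(by omega) = nums[l.toNat + k] :=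
      seg_getElem nums l r h0 hr k hks (by omega) hky
    simp only [Function.comp_apply, e1, e2, e3, PySem.Dict.getD_counter]
    by_cases hc : seg.count nums[l.toNat + k] = 1 <;> simp [hc]
  rw [List.filter_congr hpt]
  simp [List.map_map, Function.comp]

theorem loopP (nums : List Int) (f : Nat) (r : Int) (counter : PySem.Dict Int Int) :
    ∀ (ps : List Int) (prev : Int),
      (∀ p ∈ ps, (counter.getD (PySem.List.pyGetD nums p 0) 0 == 1) = true) →
      (match ps.foldl (stepA counter nums (checkA nums f)) (some prev) with
        | none => false
        | some s => checkA nums f s r)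
        = (gapsP r prev ps).all (fun ab => checkA nums f ab.1 ab.2) := by
  intro ps
  induction ps with
  | nil =>
    intro prev _
    simp [gapsP]
  | cons p t ih =>
    intro prev hcond
    rw [List.foldl_cons]
    have hstep : stepA counter nums (checkA nums f) (some prev) p
        = if !(checkA nums f prev (p - 1)) then none else some (p + 1) := by
      simp only [stepA]
      rw [if_pos (hcond p List.mem_cons_self)]
    rw [hstep]
    simp only [gapsP, List.all_cons]
    cases hA : checkA nums f prev (p - 1) with
    | false =>
      simp [foldl_stepA_none]
    | true =>
      simp only [Bool.not_true, Bool.false_eq_true, if_false]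
      rw [ih (p + 1) (fun q hq => hcond q (List.mem_cons_of_mem _ hq))]
      simp

-- ---- the split lemma: A's multi-split partition validates exactly the NB property ----

theorem NB_mono (nums : List Int) (l r a b : Int) (hla : l ≤ a) (hbr : b ≤ r)
    (h : NB nums l r) : NB nums a b :=
  fun i j h1 h2 h3 => h i j (by omega) h2 (by omega)

theorem gapsP_bounds (l r : Int) :
    ∀ (ps : List Int) (prev : Int), l ≤ prev → (∀ p ∈ ps, prev ≤ p ∧ p ≤ r) →
      ps.Pairwise (· < ·) → (ps ≠ [] ∨ l < prev) →
      ∀ ab ∈ gapsP r prev ps, l ≤ ab.1 ∧ ab.2 ≤ r ∧ ab.2 - ab.1 < r - l := by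
  intro ps
  induction ps with
  | nil =>
    intro prev hlp _ _ hcase ab hab
    simp only [gapsP, List.mem_singleton] at hab
    subst hab
    rcases hcase with h | h
    · exact absurd rfl h
    · exact ⟨hlp, le_rfl, by omega⟩
  | cons p t ih =>
    intro prev hlp hbd hpw hcase ab hab
    simp only [gapsP, List.mem_cons] at hab
    rcases hab with rfl | hab
    · obtain ⟨h1, h2⟩ := hbd p List.mem_cons_self
      exact ⟨hlp, by omega, by omega⟩
    · obtain ⟨h1, h2⟩ := hbd p List.mem_cons_self
      exact ih (p + 1) (by omega)
        (fun q hq => ⟨by have := List.rel_of_pairwise_cons hpw hq; omega,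
          (hbd q (List.mem_cons_of_mem _ hq)).2⟩)
        (List.Pairwise.of_cons hpw) (Or.inr (by omega)) ab hab

theorem gapCover (nums : List Int) (r i j : Int) (hij : i ≤ j) (hjr : j ≤ r) :
    ∀ (ps : List Int) (prev : Int), prev ≤ i →
      (∀ p ∈ ps, ¬(i ≤ p ∧ p ≤ j)) →
      (∀ ab ∈ gapsP r prev ps, NB nums ab.1 ab.2) →
      hasU (PySem.List.slice nums (some i) (some (j+1))) := by
  intro ps
  induction ps with
  | nil =>
    intro prev hpi _ hNB
    exact hNB (prev, r) (by simp [gapsP]) i j hpi hij hjr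
  | cons p t ih =>
    intro prev hpi hno hNB
    by_cases hpc : p < i
    · exact ih (p + 1) (by omega) (fun q hq => hno q (List.mem_cons_of_mem _ hq))
        (fun ab hab => hNB ab (by simp only [gapsP, List.mem_cons]; exact Or.inr hab))
    · have hjp : j < p := by
        have := hno p List.mem_cons_self
        omega
      exact hNB (prev, p - 1) (by simp [gapsP]) i j hpi hij (by omega)

theorem split_iff (nums : List Int) (l r : Int) (P : List Int) (h0 : 0 ≤ l)
    (hr : r < (nums.length : Int)) (hlr : l < r) (hne : P ≠ [])
    (hbd : ∀ p ∈ P, l ≤ p ∧ p ≤ r) (hpw : P.Pairwise (· < ·))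
    (hcnt : ∀ p ∈ P, (PySem.List.slice nums (some l) (some (r+1))).count (PySem.List.pyGetD nums p 0) = 1) :
    (∀ ab ∈ gapsP r l P, NB nums ab.1 ab.2) ↔ NB nums l r := by
  constructor
  · intro h i j hli hij hjr
    by_cases hex : ∃ p ∈ P, i ≤ p ∧ p ≤ j
    · obtain ⟨p, hp, hip, hpj⟩ := hex
      have hmem := mem_slice_of_between nums i j p (by omega) hip hpj (by omega)
      refine ⟨PySem.List.pyGetD nums p 0, hmem, ?_⟩
      have h1 : (PySem.List.slice nums (some i) (some (j+1))).count (PySem.List.pyGetD nums p 0)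
          ≤ (PySem.List.slice nums (some l) (some (r+1))).count (PySem.List.pyGetD nums p 0) :=
        count_slice_le nums l r i j _ h0 hli (by omega) hjr
      have h2 := hcnt p hp
      have h3 := List.one_le_count_iff.mpr hmem
      omega
    · push_neg at hex
      exact gapCover nums r i j hij hjr P l hli
        (fun p hp hcontra => by have := hex p hp hcontra.1; omega) h
  · intro h ab hab
    obtain ⟨h1, h2, _⟩ := gapsP_bounds l r P l le_rfl hbd hpw (Or.inl hne) ab hab
    exact NB_mono nums l r ab.1 ab.2 h1 h2 h

-- ---- A computes NB ----

theorem A_iff (nums : List Int) :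
    ∀ (fuel : Nat) (l r : Int), 0 ≤ l → r < (nums.length : Int) → (r + 1 - l).toNat ≤ fuel →
      (checkA nums fuel l r = true ↔ NB nums l r) := by
  intro fuel
  induction fuel with
  | zero =>
    intro l r h0 hr hf
    simp only [checkA]
    constructor
    · intro _ i j h1 h2 h3
      exact absurd h3 (by omega)
    · intro _; trivial
  | succ f IH =>
    intro l r h0 hr hf
    by_cases hlr : l ≥ r
    · have hA : checkA nums (f+1) l r = true := by
        simp only [checkA]; rw [if_pos hlr]
      rw [hA]
      constructor
      · intro _ i j h1 h2 h3
        have hij : i = j := by omega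
        subst hij
        rw [slice_one nums i (by omega) (by omega)]
        exact hasU_singleton _
      · intro _; rfl
    · rw [not_le] at hlr
      obtain ⟨hseg, hlen⟩ := seg_facts nums l r h0 (by omega) hr
      set seg := PySem.List.slice nums (some l) (some (r+1)) with hsegdef
      have hlen' : seg.length = (r + 1 - l).toNat := hlen
      have hsegne : seg ≠ [] := by
        intro hh
        rw [hh] at hlen'
        simp at hlen'
        omega
      obtain ⟨m, hmin⟩ := min_values_some seg hsegne
      simp only [checkA]
      rw [← hsegdef]
      rw [if_neg (by omega)]
      simp only [hmin]
      by_cases hm : m > 1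
      · rw [if_pos hm]
        constructor
        · intro h; cases h
        · intro hNB
          exfalso
          obtain ⟨v, hv, hc⟩ := hNB l r le_rfl (by omega) le_rfl
          rw [← hsegdef] at hv hc
          exact min_values_gt seg m hmin hm v hv hc
      · rw [if_neg hm]
        rw [foldl_filter_of_id _
          (fun idx => (PySem.Dict.counter seg).getD (PySem.List.pyGetD nums idx 0) 0 == 1)
          (by
            intro st x hx
            cases st with
            | none => rfl
            | some s => simp only [stepA]; rw [if_neg (by rw [Bool.not_eq_true]; exact hx)])]
        rw [afilter_eq nums l r h0 hlr hr]
        set P := (uPos seg).map (fun j => l + j) with hP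
        have hloopP := loopP nums f r (PySem.Dict.counter seg) P l
          (by
            intro p hp
            rw [hP, ← afilter_eq nums l r h0 hlr hr] at hp
            exact (List.mem_filter.mp hp).2)
        rw [hloopP, List.all_eq_true]
        have hbd : ∀ p ∈ P, l ≤ p ∧ p ≤ r := by
          intro p hp
          obtain ⟨j, hj, hpj⟩ := List.mem_map.mp hp
          obtain ⟨hj0, hjlt⟩ := uPos_mem_bounds seg j hj
          rw [hlen'] at hjlt
          rw [← hpj]
          omega
        have hpw : P.Pairwise (· < ·) := ((uPos_pairwise seg).map _) (fun a b h => by omega)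
        have hne : P ≠ [] := by
          obtain ⟨v, hvmem, hvc⟩ := min_values_le seg m hmin hm
          intro hh
          exact uPos_ne_nil seg v hvmem hvc (List.map_eq_nil_iff.mp hh)
        have hcnt : ∀ p ∈ P, seg.count (PySem.List.pyGetD nums p 0) = 1 := by
          intro p hp
          rw [hP, ← afilter_eq nums l r h0 hlr hr] at hp
          have hcond := (List.mem_filter.mp hp).2
          rw [PySem.Dict.getD_counter] at hcond
          have : ((seg.count (PySem.List.pyGetD nums p 0) : Int)) = 1 := by simpa using hcond
          exact_mod_cast this
        have hIHgap : ∀ ab ∈ gapsP r l P,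
            (checkA nums f ab.1 ab.2 = true ↔ NB nums ab.1 ab.2) := by
          intro ab hab
          obtain ⟨hab1, hab2, hab3⟩ := gapsP_bounds l r P l le_rfl hbd hpw (Or.inl hne) ab hab
          exact IH ab.1 ab.2 (by omega) (by omega) (by omega)
        have hsplit := split_iff nums l r P h0 hr hlr hne hbd hpw hcnt
        constructor
        · intro hall
          exact hsplit.mp (fun ab hab => (hIHgap ab hab).mp (hall ab hab))
        · intro hNB ab hab
          exact (hIHgap ab hab).mpr (hsplit.mpr hNB ab hab)

-- ---- B computes NB ----

theorem foldl_stepInner_none (nums : List Int) (xs : List Int) :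
    xs.foldl (stepInner nums) none = none := by
  induction xs with
  | nil => rfl
  | cons x t ih => exact ih

theorem UF_loop (nums : List Int) (i : Int) (h0 : 0 ≤ i) :
    ∀ (k : Nat) (a : Int) (d : PySem.Dict Int Int) (u : Int),
      a = (nums.length : Int) - k → i ≤ a →
      (∀ w, d.getD w 0 = ((PySem.List.slice nums (some i) (some a)).count w : Int)) →
      u = (UF (PySem.List.slice nums (some i) (some a)) : Int) →
      ((((PySem.List.pyRange a (nums.length : Int) 1).foldl (stepInner nums) (some (d, u))).isSome = true)
        ↔ ∀ j : Int, a ≤ j → j < (nums.length : Int) →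
            hasU (PySem.List.slice nums (some i) (some (j+1)))) := by
  intro k
  induction k with
  | zero =>
    intro a d u ha hia hd hu
    have ha' : a = (nums.length : Int) := by omega
    subst ha'
    have hemp : PySem.List.pyRange (nums.length : Int) (nums.length : Int) 1 = [] := by
      rw [PySem.List.pyRange_one]; simp
    rw [hemp]
    simp only [List.foldl_nil, Option.isSome_some]
    constructor
    · intro _ j hj1 hj2
      exact absurd hj2 (by omega)
    · intro _; trivial
  | succ k ih =>
    intro a d u ha hia hd hu
    have han : a < (nums.length : Int) := by omega
    rw [PySem.List.pyRange_one_cons han, List.foldl_cons]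
    have hsnoc : PySem.List.slice nums (some i) (some (a+1))
        = PySem.List.slice nums (some i) (some a) ++ [PySem.List.pyGetD nums a 0] :=
      slice_snoc nums i a h0 hia han
    simp only [stepInner]
    set v := PySem.List.pyGetD nums a 0 with hv
    set c : Int := d.getD v 0 + 1 with hcdef
    set u' : Int := if c == 1 then u + 1 else if c == 2 then u - 1 else u with hu'def
    have hcount : c = ((PySem.List.slice nums (some i) (some a)).count v : Int) + 1 := by
      rw [hcdef, hd v]
    have hUF' : u' = (UF (PySem.List.slice nums (some i) (some (a+1))) : Int) := by
      rw [hsnoc, UF_append, hu'def, hcount, hu]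
      rcases Nat.lt_or_ge ((PySem.List.slice nums (some i) (some a)).count v) 1 with hc1 | hc1
      · have h0' : (PySem.List.slice nums (some i) (some a)).count v = 0 := by omega
        simp [h0']
      · rcases Nat.lt_or_ge ((PySem.List.slice nums (some i) (some a)).count v) 2 with hc2 | hc2
        · have h1' : (PySem.List.slice nums (some i) (some a)).count v = 1 := by omega
          simp [h1']
        · have e1 : ((((PySem.List.slice nums (some i) (some a)).count v : Int) + 1) == 1) = false :=
            beq_eq_false_iff_ne.mpr (by push_cast; omega)
          have e2 : ((((PySem.List.slice nums (some i) (some a)).count v : Int) + 1) == 2) = false :=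
            beq_eq_false_iff_ne.mpr (by push_cast; omega)
          rw [if_neg (show ¬ (((((PySem.List.slice nums (some i) (some a)).count v : Int)) + 1 == 1) = true) by simp [e1]),
              if_neg (show ¬ (((((PySem.List.slice nums (some i) (some a)).count v : Int)) + 1 == 2) = true) by simp [e2]),
              if_neg (by omega), if_neg (by omega)]
    by_cases hz : u' = 0
    · rw [if_pos (show (u' == 0) = true by simp [hz])]
      rw [foldl_stepInner_none]
      simp only [Option.isSome_none]
      constructor
      · intro hcontra; cases hcontra
      · intro hall
        exfalso
        have hU0 : UF (PySem.List.slice nums (some i) (some (a+1))) = 0 := by omega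
        have hj := hall a le_rfl han
        rw [← UF_pos_iff] at hj
        omega
    · rw [if_neg (show ¬ (u' == 0) = true by simp [hz])]
      have hd' : ∀ w, (d.insert v c).getD w 0
          = ((PySem.List.slice nums (some i) (some (a+1))).count w : Int) := by
        intro w
        rw [PySem.Dict.getD_insert, hsnoc, List.count_append]
        by_cases hwv : w = v
        · rw [if_pos hwv, hcount, hwv]
          simp [List.count_cons]
        · rw [if_neg hwv, hd w]
          have hvw : List.count w [v] = 0 := by
            rw [List.count_eq_zero]
            simp [hwv]
          rw [hvw]
          simp
      have hrec := ih (a + 1) (d.insert v c) u' (by omega) (by omega) hd' hUF'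
      rw [hrec]
      have hU' : hasU (PySem.List.slice nums (some i) (some (a+1))) := by
        rw [← UF_pos_iff]
        omega
      constructor
      · intro h j hj1 hj2
        rcases eq_or_lt_of_le hj1 with he | hlt
        · subst he
          exact hU'
        · exact h j (by omega) hj2
      · intro h j hj1 hj2
        exact h j (by omega) hj2

theorem inner_iff (nums : List Int) (i : Int) (h0 : 0 ≤ i) (hin : i ≤ (nums.length : Int)) :
    (innerB nums i = true)
      ↔ ∀ j : Int, i ≤ j → j < (nums.length : Int) →
          hasU (PySem.List.slice nums (some i) (some (j+1))) := by
  unfold innerB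
  have hnil : PySem.List.slice nums (some i) (some i) = [] := by
    rw [PySem.List.slice_toNat nums h0 h0]; simp
  exact UF_loop nums i h0 ((nums.length : Int) - i).toNat i PySem.Dict.empty 0
    (by omega) le_rfl
    (fun w => by rw [hnil]; simp [PySem.Dict.getD_empty])
    (by rw [hnil, UF_nil]; rfl)

theorem B_iff (nums : List Int) :
    (solve_alt nums = true) ↔ NB nums 0 ((nums.length : Int) - 1) := by
  unfold solve_alt
  rw [List.all_eq_true]
  constructor
  · intro h i j h1 h2 h3
    have hi : i ∈ PySem.List.pyRange 0 (nums.length : Int) 1 :=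
      PySem.List.mem_pyRange_one.mpr ⟨h1, by omega⟩
    have hinner := h i hi
    rw [inner_iff nums i h1 (by omega)] at hinner
    exact hinner j h2 (by omega)
  · intro h i hi
    obtain ⟨h1, h2⟩ := PySem.List.mem_pyRange_one.mp hi
    rw [inner_iff nums i h1 (by omega)]
    intro j hj1 hj2
    exact h i j h1 hj1 (by omega)

-- ===== VERDICT (by name: the statement is the Claim_ definition above) =====
theorem solve_spec : Claim_equal_solve := by
  unfold Claim_equal_solve Spec_solve
  intro nums _
  have hA := A_iff nums (nums.length + 1) 0 ((nums.length : Int) - 1) le_rfl (by omega) (by omega)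
  have hB := B_iff nums
  have h := hA.trans hB.symm
  unfold solve
  cases hs : solve_alt nums
  · cases hc : checkA nums (nums.length + 1) 0 ((nums.length : Int) - 1)
    · rfl
    · exact absurd (h.mp hc) (by simp [hs])
  · exact h.mpr hs
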